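-- pv_equiv track=rewrite | github.com/maxrp/zone_normalize | zone_normalize/__init__.py | set_flags
-- ===== SOURCE A (Python) =====
-- from typing import Any, Dict, Iterator, Iterable, List, Tuple  # noqa
--
-- def set_flags(line: str, multiline: bool) -> Tuple[bool, bool, bool]:
--     comments = False
--     end_of_multiline = False
--
--     for token in line:
--         if not multiline and token == '(':
--             multiline = True
--         if multiline and token == ')':
--             end_of_multiline = True
--         if token == ';':
--             comments = True
--     return (comments, multiline, end_of_multiline)
-- ===== SOURCE B (Python) =====
-- def set_flags(line: str, multiline: bool):
--     comments = ';' in line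
--     if multiline:
--         return (comments, True, ')' in line)
--     head, sep, rest = line.partition('(')
--     return (comments, bool(sep), bool(sep) and ')' in rest)
-- ===== Notes on version B (the rewrite author's own statement) =====
-- stated objective: simpler
-- what changed: Replaces the stateful character loop by three independent substring tests: comments = ';' in line, and the multiline/end-of-multiline flags read off line.partition('(') (or test the whole line when multiline was already set).
import Mathlib
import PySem

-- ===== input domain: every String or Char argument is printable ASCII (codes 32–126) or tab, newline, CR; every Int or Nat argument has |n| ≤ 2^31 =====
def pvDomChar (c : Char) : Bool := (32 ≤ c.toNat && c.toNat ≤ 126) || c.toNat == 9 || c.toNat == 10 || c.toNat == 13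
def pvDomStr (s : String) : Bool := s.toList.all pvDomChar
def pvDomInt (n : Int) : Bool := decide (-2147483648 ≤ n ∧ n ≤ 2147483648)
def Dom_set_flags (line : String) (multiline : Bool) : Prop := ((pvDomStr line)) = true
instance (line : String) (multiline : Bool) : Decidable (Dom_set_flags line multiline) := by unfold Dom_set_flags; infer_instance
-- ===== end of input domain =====

-- B replaces A's stateful character loop by three independent substring tests on a partition of the line at its first '(' (objective: simpler).


-- ===== PORT A =====
-- one iteration of A's `for token in line` body over the state (comments, multiline, end_of_multiline)
def set_flags_step (st : Bool × Bool × Bool) (token : Char) : Bool × Bool × Bool :=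
  let ml := if !st.2.1 && token == '(' then true else st.2.1
  let eo := if ml && token == ')' then true else st.2.2
  let co := if token == ';' then true else st.1
  (co, ml, eo)

def set_flags (line : String) (multiline : Bool) : Bool × Bool × Bool :=
  line.toList.foldl set_flags_step (false, multiline, false)

-- ===== PORT B =====
-- "is not the separator '('": the predicate of the partition scan
def set_flags_notSep (x : Char) : Bool := !(x == '(')

-- `';' in line` / `')' in s` have a one-character needle, so they are exactly character
-- membership (List.contains); line.partition('(') with its one-character separator is exactly
-- the takeWhile/dropWhile split at the first '(' (rest = everything after it, '' if absent).
def set_flags_alt (line : String) (multiline : Bool) : Bool × Bool × Bool :=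
  let cs := line.toList
  let comments := cs.contains ';'
  if multiline then (comments, true, cs.contains ')')
  else
    let sep := cs.contains '('                       -- bool(sep): the separator was found
    let rest := (cs.dropWhile set_flags_notSep).tail -- partition('(')[2]
    (comments, sep, sep && rest.contains ')')

-- ===== PRECONDITION & SPEC =====
def Spec_set_flags (line : String) (multiline : Bool) (out : Bool × Bool × Bool) : Prop := out = set_flags_alt line multiline
instance (line : String) (multiline : Bool) (out : Bool × Bool × Bool) : Decidable (Spec_set_flags line multiline out) := by unfold Spec_set_flags; infer_instance

-- ===== CLAIM (what is proved, stated in full; the proofs are below) =====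
def Claim_equal_set_flags : Prop := ∀ (line : String) (multiline : Bool), Dom_set_flags line multiline → Spec_set_flags line multiline (set_flags line multiline)

-- ===== LEMMAS AND PROOFS =====

-- closed form of A's loop from any starting state: comments/multiline are membership tests,
-- end_of_multiline sees the whole line if multiline started true, else only what follows the first '('
theorem set_flags_foldl_char (cs : List Char) : ∀ (co ml eo : Bool),
    cs.foldl set_flags_step (co, ml, eo) =
      (co || cs.contains ';',
       ml || cs.contains '(',
       eo || (if ml then cs.contains ')' else ((cs.dropWhile set_flags_notSep).tail).contains ')')) := by
  induction cs with
  | nil => intro co ml eo; simp [List.dropWhile]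
  | cons c cs ih =>
    intro co ml eo
    simp only [List.foldl_cons, set_flags_step, ih, Prod.mk.injEq, List.contains_cons]
    refine ⟨?_, ?_, ?_⟩
    · by_cases h : c = ';'
      · subst h; simp
      · have h2 : (';' == c) = false := by simp [Ne.symm h]
        simp [h, h2]
    · cases ml with
      | true => by_cases h : c = '(' <;> simp [h]
      | false =>
        by_cases h : c = '('
        · subst h; simp
        · have h2 : ('(' == c) = false := by simp [Ne.symm h]
          simp [h, h2]
    · cases ml with
      | true =>
        by_cases h : c = ')'
        · subst h; simp
        · have h2 : (')' == c) = false := by simp [Ne.symm h]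
          simp [h, h2]
      | false =>
        by_cases h : c = '('
        · subst h; simp [set_flags_notSep]
        · simp [h, set_flags_notSep]

-- if the line has no '(', the partition's rest is empty, so its ')' test is false
theorem set_flags_rest_of_no_paren (cs : List Char) (h : cs.contains '(' = false) :
    ((cs.dropWhile set_flags_notSep).tail).contains ')' = false := by
  have hnil : cs.dropWhile set_flags_notSep = [] := by
    rw [List.dropWhile_eq_nil_iff]
    intro x hx
    simp only [set_flags_notSep, Bool.not_eq_eq_eq_not, Bool.not_true, beq_eq_false_iff_ne, ne_eq]
    intro hxe; subst hxe
    simp [List.contains_eq_mem] at h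
    exact h hx
  simp [hnil]

-- ===== VERDICT (by name: the statement is the Claim_ definition above) =====
theorem set_flags_spec : Claim_equal_set_flags := by
  intro line multiline _
  unfold Spec_set_flags set_flags set_flags_alt
  rw [set_flags_foldl_char]
  cases multiline with
  | true => simp
  | false =>
    cases h : line.toList.contains '(' with
    | true =>
      have h' : '(' ∈ line.toList := by simpa [List.contains_eq_mem] using h
      simp [h']
    | false =>
      have h' : '(' ∉ line.toList := by simpa [List.contains_eq_mem] using h
      have h2 : ')' ∉ ((line.toList.dropWhile set_flags_notSep).tail) := by
        simpa [List.contains_eq_mem] using set_flags_rest_of_no_paren _ h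
      simp [h', h2]
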